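-- pv_equiv track=rewrite | github.com/yashitanamdeo/geeks-for-geeks | Easy/rightmost_different_bit.py | posOfRightMostDiffBit
-- ===== SOURCE A (Python) =====
-- def posOfRightMostDiffBit(m, n):
--     # XOR of two numbers will give a number with set bits at the different positions.
--     xor_result = m ^ n
--
--     # If the numbers are the same, return -1.
--     if xor_result == 0:
--         return -1
--
--     # Find the position of the rightmost set bit in the XOR result.
--     position = 1
--     while xor_result:
--         if xor_result & 1:
--             return position
--         xor_result >>= 1
--         position += 1
--
--     # This line should not be reached, as there must be a different bit.
--     return -1
-- ===== SOURCE B (Python) =====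
-- def posOfRightMostDiffBit(m, n):
--     # Closed form: isolate the lowest set bit of the xor and take its bit length.
--     xor = m ^ n
--     if xor == 0:
--         return -1
--     return (xor & -xor).bit_length()
-- ===== Notes on version B (the rewrite author's own statement) =====
-- stated objective: simpler
-- what changed: Replaces the bit-by-bit scanning loop with a closed-form bit trick: isolate the lowest set bit with xor & -xor and return its bit_length().
import Mathlib
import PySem

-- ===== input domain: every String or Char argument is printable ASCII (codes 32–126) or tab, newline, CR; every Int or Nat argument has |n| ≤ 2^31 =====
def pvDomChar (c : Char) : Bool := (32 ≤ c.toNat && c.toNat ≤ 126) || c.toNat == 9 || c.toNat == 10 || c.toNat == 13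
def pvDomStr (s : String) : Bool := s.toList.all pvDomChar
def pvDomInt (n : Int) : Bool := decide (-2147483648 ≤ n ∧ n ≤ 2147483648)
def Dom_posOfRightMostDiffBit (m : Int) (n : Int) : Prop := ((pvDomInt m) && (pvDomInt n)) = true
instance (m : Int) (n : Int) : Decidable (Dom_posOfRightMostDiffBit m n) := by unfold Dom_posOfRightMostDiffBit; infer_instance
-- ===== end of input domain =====

-- B replaces A's bit-by-bit scanning loop by a closed-form bit trick (isolate the lowest set
-- bit of the xor with x & -x and take its bit_length); objective: simpler.


-- ===== PORT A =====
-- (Python `^`, `&`, `>>` on int are Int.xor, Int.land, Int.shiftRight: exact two's-complement semantics)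
-- Nat fact cited by the termination proof of the loop below
theorem pvLdiff_one_even (j : Nat) : Nat.ldiff 1 (2 * j) = 1 := by
  apply Nat.eq_of_testBit_eq
  intro i
  simp only [Nat.testBit_ldiff]
  cases i with
  | zero =>
    have h1 : (2 * j) % 2 = 0 := by omega
    simp [Nat.testBit_zero, h1]
  | succ i =>
    simp only [Nat.testBit_add_one]
    have h3 : (1 : Nat) / 2 = 0 := by omega
    simp [h3]

-- termination fact for the while loop: on the recursive branch the scanned value shrinks
theorem pvShiftLt (x : Int) (hx : ¬ x = 0) (h : Int.land x 1 = 0) :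
    (Int.shiftRight x 1).natAbs < x.natAbs := by
  cases x with
  | ofNat m =>
    cases m with
    | zero => exact absurd rfl hx
    | succ k =>
      show ((k + 1) >>> 1) < k + 1
      simp only [Nat.shiftRight_succ, Nat.shiftRight_zero]
      omega
  | negSucc m =>
    cases m with
    | zero =>
      exfalso
      have h0 : Int.land (Int.negSucc 0) 1 = ((Nat.ldiff 1 0 : Nat) : Int) := rfl
      have h10 : Nat.ldiff 1 0 = 1 := by simpa using pvLdiff_one_even 0
      rw [h0, h10] at h
      exact absurd h (by norm_num)
    | succ k =>
      show ((k + 1) >>> 1) + 1 < (k + 1) + 1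
      simp only [Nat.shiftRight_succ, Nat.shiftRight_zero]
      omega

-- 'while xor_result: if xor_result & 1: return position; xor_result >>= 1; position += 1' then 'return -1'
def pvLoopA (x : Int) (pos : Int) : Int :=
  if hx : x = 0 then -1
  else if h1 : Int.land x 1 ≠ 0 then pos
  else pvLoopA (Int.shiftRight x 1) (pos + 1)
termination_by x.natAbs
decreasing_by exact pvShiftLt x hx (not_not.mp h1)

def posOfRightMostDiffBit (m : Int) (n : Int) : Int :=
  let xorResult := Int.xor m n
  if xorResult = 0 then -1
  else pvLoopA xorResult 1

-- ===== PORT B =====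
-- Python's int.bit_length, exact for v ≥ 0 (B only applies it to a positive value)
def pvBitLength (v : Int) : Int :=
  if v ≤ 0 then 0 else (Nat.log2 v.toNat : Int) + 1

def posOfRightMostDiffBit_alt (m : Int) (n : Int) : Int :=
  let xor := Int.xor m n
  if xor = 0 then -1
  else pvBitLength (Int.land xor (-xor))

-- ===== PRECONDITION & SPEC =====
def Spec_posOfRightMostDiffBit (m : Int) (n : Int) (out : Int) : Prop := out = posOfRightMostDiffBit_alt m n
instance (m : Int) (n : Int) (out : Int) : Decidable (Spec_posOfRightMostDiffBit m n out) := by unfold Spec_posOfRightMostDiffBit; infer_instance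

-- ===== CLAIM (what is proved, stated in full; the proofs are below) =====
def Claim_equal_posOfRightMostDiffBit : Prop := ∀ (m : Int) (n : Int), Dom_posOfRightMostDiffBit m n → Spec_posOfRightMostDiffBit m n (posOfRightMostDiffBit m n)

-- ===== LEMMAS AND PROOFS =====

-- Nat-level ldiff facts, all by bitwise extensionality
theorem pvNegOfNat (a : Nat) : -(Int.ofNat (a + 1)) = Int.negSucc a := by
  rw [Int.negSucc_eq, Int.ofNat_eq_natCast]; omega

theorem pvNegNegSucc (a : Nat) : -(Int.negSucc a) = Int.ofNat (a + 1) := by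
  rw [Int.negSucc_eq, Int.ofNat_eq_natCast]; omega

theorem pvLdiff_succ_self (j : Nat) : Nat.ldiff (2 * j + 1) (2 * j) = 1 := by
  apply Nat.eq_of_testBit_eq
  intro i
  simp only [Nat.testBit_ldiff]
  cases i with
  | zero =>
    have h1 : (2 * j + 1) % 2 = 1 := by omega
    have h2 : (2 * j) % 2 = 0 := by omega
    simp [Nat.testBit_zero, h1, h2]
  | succ i =>
    simp only [Nat.testBit_add_one]
    have h1 : (2 * j + 1) / 2 = j := by omega
    have h2 : (2 * j) / 2 = j := by omega
    have h3 : (1 : Nat) / 2 = 0 := by omega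
    simp [h1, h2, h3]

theorem pvLdiff_one_odd (j : Nat) : Nat.ldiff 1 (2 * j + 1) = 0 := by
  apply Nat.eq_of_testBit_eq
  intro i
  simp only [Nat.testBit_ldiff]
  cases i with
  | zero =>
    have h1 : (2 * j + 1) % 2 = 1 := by omega
    simp [Nat.testBit_zero, h1]
  | succ i =>
    simp only [Nat.testBit_add_one]
    have h3 : (1 : Nat) / 2 = 0 := by omega
    simp [h3]

theorem pvLdiff_double (k : Nat) : Nat.ldiff (2 * k + 2) (2 * k + 1) = 2 * Nat.ldiff (k + 1) k := by
  apply Nat.eq_of_testBit_eq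
  intro i
  simp only [Nat.testBit_ldiff]
  cases i with
  | zero =>
    have h1 : (2 * k + 2) % 2 = 0 := by omega
    have h2 : (2 * Nat.ldiff (k + 1) k) % 2 = 0 := by omega
    simp [Nat.testBit_zero, h1, h2]
  | succ i =>
    simp only [Nat.testBit_add_one]
    have h1 : (2 * k + 2) / 2 = k + 1 := by omega
    have h2 : (2 * k + 1) / 2 = k := by omega
    have h3 : (2 * Nat.ldiff (k + 1) k) / 2 = Nat.ldiff (k + 1) k := by omega
    rw [h1, h2, h3, Nat.testBit_ldiff]

-- odd case: the lowest set bit of an odd number is bit 0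
theorem pvLowOdd (x : Int) (h : Int.land x 1 ≠ 0) : Int.land x (-x) = 1 := by
  cases x with
  | ofNat m =>
    obtain ⟨j, rfl⟩ | ⟨j, rfl⟩ : (∃ j, m = 2 * j) ∨ (∃ j, m = 2 * j + 1) := by
      rcases Nat.even_or_odd m with ⟨j, hj⟩ | ⟨j, hj⟩
      exacts [Or.inl ⟨j, by omega⟩, Or.inr ⟨j, by omega⟩]
    · exfalso
      apply h
      show ((2 * j &&& 1 : Nat) : Int) = 0
      rw [Nat.and_one_is_mod]
      have hm : (2 * j) % 2 = 0 := by omega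
      rw [hm]; rfl
    · rw [pvNegOfNat (2 * j)]
      show ((Nat.ldiff (2 * j + 1) (2 * j) : Nat) : Int) = 1
      rw [pvLdiff_succ_self]; rfl
  | negSucc m =>
    obtain ⟨j, rfl⟩ | ⟨j, rfl⟩ : (∃ j, m = 2 * j) ∨ (∃ j, m = 2 * j + 1) := by
      rcases Nat.even_or_odd m with ⟨j, hj⟩ | ⟨j, hj⟩
      exacts [Or.inl ⟨j, by omega⟩, Or.inr ⟨j, by omega⟩]
    · rw [pvNegNegSucc (2 * j)]
      show ((Nat.ldiff (2 * j + 1) (2 * j) : Nat) : Int) = 1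
      rw [pvLdiff_succ_self]; rfl
    · exfalso
      apply h
      show ((Nat.ldiff 1 (2 * j + 1) : Nat) : Int) = 0
      rw [pvLdiff_one_odd]; rfl

-- even case: halving shifts the lowest set bit down by one
theorem pvLowEven (x : Int) (hx : x ≠ 0) (h : Int.land x 1 = 0) :
    Int.land x (-x) = 2 * Int.land (Int.shiftRight x 1) (-(Int.shiftRight x 1)) := by
  cases x with
  | ofNat m =>
    obtain ⟨j, rfl⟩ | ⟨j, rfl⟩ : (∃ j, m = 2 * j) ∨ (∃ j, m = 2 * j + 1) := by
      rcases Nat.even_or_odd m with ⟨j, hj⟩ | ⟨j, hj⟩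
      exacts [Or.inl ⟨j, by omega⟩, Or.inr ⟨j, by omega⟩]
    · have hj0 : j ≠ 0 := by
        rintro rfl
        exact hx (by norm_num)
      obtain ⟨k, rfl⟩ : ∃ k, j = k + 1 := ⟨j - 1, by omega⟩
      have he : 2 * (k + 1) = 2 * k + 1 + 1 := by omega
      rw [he, pvNegOfNat (2 * k + 1)]
      have hsh : Int.shiftRight (Int.ofNat (2 * k + 1 + 1)) 1 = Int.ofNat (k + 1) := by
        show Int.ofNat ((2 * k + 1 + 1) >>> 1) = Int.ofNat (k + 1)
        simp only [Nat.shiftRight_succ, Nat.shiftRight_zero]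
        congr 1; omega
      rw [hsh, pvNegOfNat k]
      show ((Nat.ldiff (2 * k + 1 + 1) (2 * k + 1) : Nat) : Int)
          = 2 * ((Nat.ldiff (k + 1) k : Nat) : Int)
      have he2 : 2 * k + 1 + 1 = 2 * k + 2 := by omega
      rw [he2, pvLdiff_double]
      push_cast; ring
    · exfalso
      have h' : Int.land (Int.ofNat (2 * j + 1)) 1 = (((2 * j + 1) &&& 1 : Nat) : Int) := rfl
      rw [h', Nat.and_one_is_mod] at h
      have hm : (2 * j + 1) % 2 = 1 := by omega
      rw [hm] at h
      exact absurd h (by norm_num)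
  | negSucc m =>
    obtain ⟨j, rfl⟩ | ⟨j, rfl⟩ : (∃ j, m = 2 * j) ∨ (∃ j, m = 2 * j + 1) := by
      rcases Nat.even_or_odd m with ⟨j, hj⟩ | ⟨j, hj⟩
      exacts [Or.inl ⟨j, by omega⟩, Or.inr ⟨j, by omega⟩]
    · exfalso
      have h' : Int.land (Int.negSucc (2 * j)) 1 = ((Nat.ldiff 1 (2 * j) : Nat) : Int) := rfl
      rw [h', pvLdiff_one_even] at h
      exact absurd h (by norm_num)
    · rw [pvNegNegSucc (2 * j + 1)]
      have hsh : Int.shiftRight (Int.negSucc (2 * j + 1)) 1 = Int.negSucc j := by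
        show Int.negSucc ((2 * j + 1) >>> 1) = Int.negSucc j
        simp only [Nat.shiftRight_succ, Nat.shiftRight_zero]
        congr 1; omega
      rw [hsh, pvNegNegSucc j]
      show ((Nat.ldiff (2 * j + 1 + 1) (2 * j + 1) : Nat) : Int)
          = 2 * ((Nat.ldiff (j + 1) j : Nat) : Int)
      have he2 : 2 * j + 1 + 1 = 2 * j + 2 := by omega
      rw [he2, pvLdiff_double]
      push_cast; ring

-- a nonzero even integer stays nonzero after the halving shift
theorem pvShiftNe (x : Int) (hx : x ≠ 0) (h : Int.land x 1 = 0) : Int.shiftRight x 1 ≠ 0 := by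
  cases x with
  | ofNat m =>
    cases m with
    | zero => exact absurd rfl hx
    | succ k =>
      intro hc
      have hc' : ((k + 1) >>> 1 : Nat) = 0 := by
        have h2 : Int.ofNat ((k + 1) >>> 1) = 0 := hc
        rw [Int.ofNat_eq_natCast] at h2
        exact_mod_cast h2
      simp only [Nat.shiftRight_succ, Nat.shiftRight_zero] at hc'
      have hk : k = 0 := by omega
      subst hk
      have h' : Int.land (Int.ofNat 1) 1 = ((1 &&& 1 : Nat) : Int) := rfl
      rw [h', Nat.and_one_is_mod] at h
      exact absurd h (by norm_num)
  | negSucc m =>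
    intro hc
    exact absurd hc (by simp [Int.shiftRight])

-- loop characterization: position returned = start position + log2 of the isolated lowest set bit
theorem pvMainAux (N : Nat) : ∀ (x : Int), x.natAbs ≤ N → x ≠ 0 →
    0 < Int.land x (-x) ∧
      ∀ p : Int, pvLoopA x p = p + (Nat.log2 (Int.land x (-x)).toNat : Int) := by
  induction N with
  | zero =>
    intro x hle hx
    exact absurd (by omega : x = 0) hx
  | succ N ih =>
    intro x hle hx
    by_cases h1 : Int.land x 1 = 0
    · -- even: recurse on the shifted value
      have hy := pvShiftNe x hx h1
      have hlt := pvShiftLt x hx h1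
      obtain ⟨hpos, hloop⟩ := ih (Int.shiftRight x 1) (by omega) hy
      have hlow := pvLowEven x hx h1
      refine ⟨by rw [hlow]; omega, ?_⟩
      intro p
      rw [pvLoopA, dif_neg hx, dif_neg (by simpa using h1), hloop, hlow]
      have htn : (2 * Int.land (Int.shiftRight x 1) (-(Int.shiftRight x 1))).toNat
          = 2 * (Int.land (Int.shiftRight x 1) (-(Int.shiftRight x 1))).toNat := by omega
      rw [htn, Nat.log2_two_mul (by omega)]
      push_cast; ring
    · -- odd: the loop returns immediately
      have hlow := pvLowOdd x h1
      refine ⟨by rw [hlow]; omega, ?_⟩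
      intro p
      rw [pvLoopA, dif_neg hx, dif_pos h1, hlow]
      norm_num [Nat.log2]

-- ===== VERDICT (by name: the statement is the Claim_ definition above) =====
theorem posOfRightMostDiffBit_spec : Claim_equal_posOfRightMostDiffBit := by
  intro m n _
  unfold Spec_posOfRightMostDiffBit posOfRightMostDiffBit posOfRightMostDiffBit_alt
  by_cases hx : Int.xor m n = 0
  · simp [hx]
  · simp only [hx, if_false]
    obtain ⟨hpos, hloop⟩ := pvMainAux (Int.xor m n).natAbs (Int.xor m n) le_rfl hx
    rw [hloop 1]
    unfold pvBitLength
    rw [if_neg (by omega)]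
    ring
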